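-- pv_equiv track=rewrite | github.com/TylerMorley/advent-of-code | 2024/day04/day04.py | getMasLocs
-- ===== SOURCE A (Python) =====
-- def getMasLocs(word_search, word):
--     locations = []
--     for i in range(len(word_search)):
--         row = word_search[i]
--         j = row.find(word)
--         while j != -1:
--             locations.append([i,j+1])
--             j = row.find(word, j+1)
--
--     return locations
-- ===== SOURCE B (Python) =====
-- def getMasLocs(word_search, word):
--     locations = []
--     m = len(word)
--     for i, row in enumerate(word_search):
--         for j in range(len(row) - m + 1):
--             if row[j:j+m] == word:
--                 locations.append([i, j+1])
--     return locations
-- ===== Notes on version B (the rewrite author's own statement) =====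
-- stated objective: idiomatic
-- what changed: Replaces the chained row.find(word, j+1) while-loop with an explicit scan of every starting index j testing row[j:j+len(word)] == word, over enumerate(word_search) instead of range-indexing.
import Mathlib
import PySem

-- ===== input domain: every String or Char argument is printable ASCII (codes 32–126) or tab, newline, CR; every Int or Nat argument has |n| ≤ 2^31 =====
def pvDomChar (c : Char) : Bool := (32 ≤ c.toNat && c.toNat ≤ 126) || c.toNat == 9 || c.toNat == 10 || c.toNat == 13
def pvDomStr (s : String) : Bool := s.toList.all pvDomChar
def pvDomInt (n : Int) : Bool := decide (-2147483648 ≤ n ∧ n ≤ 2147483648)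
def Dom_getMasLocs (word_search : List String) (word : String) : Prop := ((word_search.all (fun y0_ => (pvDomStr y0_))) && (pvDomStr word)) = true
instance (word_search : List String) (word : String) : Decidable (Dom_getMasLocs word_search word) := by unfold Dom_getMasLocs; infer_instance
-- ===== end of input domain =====

-- B replaces the chained row.find(word, j+1) while-loop with an explicit scan of every
-- starting index testing row[j:j+len(word)] == word (objective: idiomatic; same cost).

-- ===== PORT A =====
-- the 'while j != -1' loop; fuel (row length + 2) is a totality guard only: j strictly
-- increases and never exceeds len(row), so the fuel is never exhausted
def getMasLocsGo (row word : String) (i : Int) (j : Int) (acc : List (List Int)) : Nat → List (List Int)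
  | 0 => acc
  | fuel+1 =>
    if j = -1 then acc
    else getMasLocsGo row word i (PySem.Str.findFrom row word (j+1)) (acc ++ [[i, j+1]]) fuel

def getMasLocs (word_search : List String) (word : String) : List (List Int) :=
  (PySem.List.pyRange 0 word_search.length 1).foldl
    (fun acc i =>
      let row := PySem.List.pyGetD word_search i ""
      getMasLocsGo row word i (PySem.Str.find row word) acc (row.toList.length + 2))
    []

-- ===== PORT B =====
def getMasLocs_alt (word_search : List String) (word : String) : List (List Int) :=
  let m := PySem.Str.len word
  (PySem.List.enumerate word_search).foldl
    (fun acc p =>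
      (PySem.List.pyRange 0 (PySem.Str.len p.2 - m + 1) 1).foldl
        (fun acc2 j =>
          if PySem.Str.slice p.2 (some j) (some (j + m)) = word then acc2 ++ [[p.1, j + 1]]
          else acc2)
        acc)
    []

-- ===== PRECONDITION & SPEC =====
def Spec_getMasLocs (word_search : List String) (word : String) (out : List (List Int)) : Prop := out = getMasLocs_alt word_search word
instance (word_search : List String) (word : String) (out : List (List Int)) : Decidable (Spec_getMasLocs word_search word out) := by unfold Spec_getMasLocs; infer_instance

-- ===== CLAIM (what is proved, stated in full; the proofs are below) =====
def Claim_equal_getMasLocs : Prop := ∀ (word_search : List String) (word : String), Dom_getMasLocs word_search word → Spec_getMasLocs word_search word (getMasLocs word_search word)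

-- ===== LEMMAS AND PROOFS =====

-- j is a hit in row s for word w
def pvHit (s w : List Char) (j : Nat) : Bool := decide (w <+: s.drop j)

-- the common value both row loops produce for row s at row index i
def pvRowRes (w : String) (i : Int) (s : String) : List (List Int) :=
  ((List.range (s.toList.length + 1)).filter (pvHit s.toList w.toList)).map
    (fun j => [i, (j : Int) + 1])

theorem pvFindFrom_past (s w : List Char) (k : Nat) (h : s.length < k) :
    PySem.Chars.findFrom s w k none = -1 := by
  simp only [PySem.Chars.findFrom]
  rw [if_neg (by omega : ¬((k : Int) < 0)), if_pos (by exact_mod_cast h)]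

theorem pvFilter_range_split (n k j0 : Nat) (p : Nat → Bool) (hk : k ≤ j0) (hj : j0 < n)
    (hp : p j0 = true) (hmin : ∀ j, k ≤ j → j < j0 → p j = false) :
    (List.range n).filter (fun j => decide (k ≤ j) && p j)
      = j0 :: (List.range n).filter (fun j => decide (j0 + 1 ≤ j) && p j) := by
  have hsplit : n = (j0 + 1) + (n - (j0 + 1)) := by omega
  rw [hsplit, List.range_add, List.range_succ]
  simp only [List.filter_append]
  have h1 : (List.range j0).filter (fun j => decide (k ≤ j) && p j) = [] := by
    rw [List.filter_eq_nil_iff]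
    intro j hjm
    have hjlt : j < j0 := List.mem_range.mp hjm
    by_cases hkj : k ≤ j
    · simp [hkj, hmin j hkj hjlt]
    · simp [hkj]
  have h2 : (List.range j0).filter (fun j => decide (j0 + 1 ≤ j) && p j) = [] := by
    rw [List.filter_eq_nil_iff]
    intro j hjm
    have hjlt : j < j0 := List.mem_range.mp hjm
    simp [show ¬ (j0 + 1 ≤ j) by omega]
  have h3 : ((List.range (n - (j0+1))).map (fun x => (j0+1) + x)).filter
        (fun j => decide (k ≤ j) && p j)
      = ((List.range (n - (j0+1))).map (fun x => (j0+1) + x)).filter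
        (fun j => decide (j0 + 1 ≤ j) && p j) := by
    apply List.filter_congr
    intro j hjm
    obtain ⟨x, _, rfl⟩ := List.mem_map.mp hjm
    simp [show k ≤ j0 + 1 + x by omega, show j0 + 1 ≤ j0 + 1 + x by omega]
  rw [h1, h2, h3]
  simp [hk, hp]

-- hits at or beyond j are infixes of the drop
theorem pvHit_infix (s w : List Char) (k j : Nat) (hkj : k ≤ j) (h : w <+: s.drop j) :
    w <:+: s.drop k := by
  have hd : (s.drop k).drop (j - k) = s.drop j := by
    rw [List.drop_drop]; congr 1; omega
  exact (h.isInfix).trans (hd ▸ List.drop_suffix (j - k) (s.drop k)).isInfix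

-- the A-side while-loop, started at search position k, collects exactly the hits ≥ k
theorem pvGoA_eq (s w : String) (i : Int) :
    ∀ (fuel k : Nat) (acc : List (List Int)), k ≤ s.toList.length + 1 →
      s.toList.length + 2 - k ≤ fuel →
      getMasLocsGo s w i (PySem.Chars.findFrom s.toList w.toList (k : Int) none) acc fuel
        = acc ++ ((List.range (s.toList.length + 1)).filter
            (fun j => decide (k ≤ j) && pvHit s.toList w.toList j)).map
            (fun j => [i, (j : Int) + 1]) := by
  intro fuel
  induction fuel with
  | zero => intro k acc hk hf; omega
  | succ fuel ih =>
    intro k acc hk hf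
    set n := s.toList.length with hn
    by_cases hk1 : k = n + 1
    · have hpast : PySem.Chars.findFrom s.toList w.toList (k : Int) none = -1 :=
        pvFindFrom_past _ _ _ (by omega)
      have hnil : (List.range (n + 1)).filter
          (fun j => decide (k ≤ j) && pvHit s.toList w.toList j) = [] := by
        rw [List.filter_eq_nil_iff]
        intro j hjm
        simp [show ¬ (k ≤ j) by have := List.mem_range.mp hjm; omega]
      rw [hpast, hnil]
      simp [getMasLocsGo]
    · have hkn : k ≤ n := by omega
      by_cases hj : PySem.Chars.findFrom s.toList w.toList (k : Int) none = -1
      · have hnone : ¬ w.toList <:+: s.toList.drop k :=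
          (PySem.Chars.findFrom_natCast_eq_neg_one_iff s.toList w.toList k hkn).mp hj
        have hnil : (List.range (n + 1)).filter
            (fun j => decide (k ≤ j) && pvHit s.toList w.toList j) = [] := by
          rw [List.filter_eq_nil_iff]
          intro j _
          by_cases hkj : k ≤ j
          · by_cases hpj : pvHit s.toList w.toList j = true
            · exact absurd (pvHit_infix s.toList w.toList k j hkj (by
                simpa [pvHit] using hpj)) hnone
            · simp [hpj]
          · simp [hkj]
        rw [hj, hnil]
        simp [getMasLocsGo]
      · obtain ⟨hge, hpre, hmin⟩ :=
          PySem.Chars.findFrom_natCast_spec s.toList w.toList k hkn hj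
        set j0 := PySem.Chars.findFrom s.toList w.toList (k : Int) none with hj0
        have hj0nn : 0 ≤ j0 := le_trans (by positivity) hge
        have hj0le : j0 ≤ (n : Int) := by
          rw [hj0, PySem.Chars.findFrom_natCast s.toList w.toList k hkn]
          have hfl := PySem.Chars.find_le_length (s.toList.drop k) w.toList
          rw [List.length_drop] at hfl
          split
          · omega
          · omega
        have hcast : j0 = ((j0.toNat : Nat) : Int) := by omega
        have hkle : k ≤ j0.toNat := by omega
        have hj0n : j0.toNat ≤ n := by omega
        -- unfold one step of the loop
        rw [getMasLocsGo]
        rw [if_neg hj]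
        have hstep : PySem.Str.findFrom s w (j0 + 1)
            = PySem.Chars.findFrom s.toList w.toList ((j0.toNat + 1 : Nat) : Int) none := by
          rw [PySem.Str.findFrom_eq]; congr 1; omega
        rw [hstep, ih (j0.toNat + 1) (acc ++ [[i, j0 + 1]]) (by omega) (by omega)]
        rw [pvFilter_range_split (n + 1) k j0.toNat (pvHit s.toList w.toList) hkle
          (by omega) (by simpa [pvHit] using hpre)
          (fun j h1 h2 => by simp [pvHit]; exact hmin j h1 h2)]
        rw [show j0 = ((j0.toNat : Nat) : Int) from hcast]
        simp [List.append_assoc]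

-- the value of one full A-side row loop
theorem pvRowA (w : String) (i : Int) (s : String) (acc : List (List Int)) :
    getMasLocsGo s w i (PySem.Str.find s w) acc (s.toList.length + 2)
      = acc ++ pvRowRes w i s := by
  have h0 : PySem.Str.find s w = PySem.Chars.findFrom s.toList w.toList ((0 : Nat) : Int) none := by
    rw [PySem.Str.find_eq]
    exact (PySem.Chars.findFrom_zero s.toList w.toList).symm
  rw [h0, pvGoA_eq s w i (s.toList.length + 2) 0 acc (by omega) (by omega)]
  simp [pvRowRes]

-- the value of one full B-side row loop
theorem pvRowB (w : String) (i : Int) (s : String) (acc : List (List Int)) :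
    (PySem.List.pyRange 0 (PySem.Str.len s - PySem.Str.len w + 1) 1).foldl
      (fun acc2 j =>
        if PySem.Str.slice s (some j) (some (j + PySem.Str.len w)) = w then acc2 ++ [[i, j + 1]]
        else acc2) acc
      = acc ++ pvRowRes w i s := by
  set n := s.toList.length with hn
  set m := w.toList.length with hm
  have hlen_s : PySem.Str.len s = (n : Int) := by simp [PySem.Str.len_eq, hn]
  have hlen_w : PySem.Str.len w = (m : Int) := by simp [PySem.Str.len_eq, hm]
  by_cases hmn : m ≤ n
  · have hrange : PySem.List.pyRange 0 (PySem.Str.len s - PySem.Str.len w + 1) 1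
        = (List.range (n - m + 1)).map (fun j => ((j : Nat) : Int)) := by
      rw [hlen_s, hlen_w]
      rw [PySem.List.pyRange_one 0 ((n : Int) - m + 1)]
      have : ((n : Int) - m + 1 - 0).toNat = n - m + 1 := by omega
      rw [this]
      apply List.map_congr_left
      intro j _
      omega
    rw [hrange, List.foldl_map]
    have hbody : ∀ (acc2 : List (List Int)) (j : Nat),
        (if PySem.Str.slice s (some ((j : Nat) : Int)) (some (((j : Nat) : Int) + PySem.Str.len w)) = w
          then acc2 ++ [[i, ((j : Nat) : Int) + 1]] else acc2)
        = (if pvHit s.toList w.toList j then acc2 ++ [[i, ((j : Nat) : Int) + 1]] else acc2) := by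
      intro acc2 j
      refine if_congr ?_ rfl rfl
      have hsl : PySem.Str.slice s (some ((j : Nat) : Int)) (some (((j : Nat) : Int) + PySem.Str.len w))
          = w ↔ (PySem.Str.slice s (some ((j : Nat) : Int)) (some (((j : Nat) : Int) + PySem.Str.len w))).toList
          = w.toList := by
        constructor
        · intro h; rw [h]
        · intro h
          have := congrArg String.ofList h
          simpa using this
      rw [hsl, PySem.Str.toList_slice]
      have hslice : PySem.Chars.slice s.toList (some ((j : Nat) : Int)) (some (((j : Nat) : Int) + PySem.Str.len w))
          = (s.toList.drop j).take m := by
        rw [hlen_w]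
        show PySem.List.slice s.toList (some ((j : Nat) : Int)) (some (((j : Nat) : Int) + (m : Int)))
          = (s.toList.drop j).take m
        have := PySem.List.slice_toNat (xs := s.toList) (a := ((j : Nat) : Int))
          (b := ((j : Nat) : Int) + (m : Int)) (by positivity) (by positivity)
        rw [this]
        congr 1
        omega
      rw [hslice]
      simp only [pvHit, decide_eq_true_eq]
      rw [List.prefix_iff_eq_take, ← hm, eq_comm]
    have : (fun (acc2 : List (List Int)) (j : Nat) =>
        if PySem.Str.slice s (some ((j : Nat) : Int)) (some (((j : Nat) : Int) + PySem.Str.len w)) = w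
        then acc2 ++ [[i, ((j : Nat) : Int) + 1]] else acc2)
        = (fun (acc2 : List (List Int)) (j : Nat) =>
          if pvHit s.toList w.toList j then acc2 ++ [[i, ((j : Nat) : Int) + 1]] else acc2) :=
      funext fun acc2 => funext fun j => hbody acc2 j
    rw [this, PySem.List.foldl_append_if (pvHit s.toList w.toList)
      (fun j => [i, ((j : Nat) : Int) + 1]) (List.range (n - m + 1)) acc]
    unfold pvRowRes
    congr 1
    have hext : (List.range (n + 1)).filter (pvHit s.toList w.toList)
        = (List.range (n - m + 1)).filter (pvHit s.toList w.toList) := by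
      have hsp : n + 1 = (n - m + 1) + m := by omega
      rw [hsp, List.range_add, List.filter_append]
      have : ((List.range m).map (fun x => (n - m + 1) + x)).filter (pvHit s.toList w.toList) = [] := by
        rw [List.filter_eq_nil_iff]
        intro j hjm
        obtain ⟨x, hx, rfl⟩ := List.mem_map.mp hjm
        have hxm : x < m := List.mem_range.mp hx
        simp only [pvHit, decide_eq_true_eq]
        intro hpre
        have := hpre.length_le
        simp only [List.length_drop] at this
        omega
      rw [this, List.append_nil]
    rw [hext]
    have hfm : ∀ (F : List Nat),
        List.map (fun j : Nat => [i, (j : Int) + 1]) F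
          = List.map (fun j : Int => [i, j + 1]) (List.flatMap (fun a : Nat => [(a : Int)]) F) := by
      intro F
      induction F with
      | nil => rfl
      | cons x xs ih => simp_all
    exact hfm _
  · have hrange : PySem.List.pyRange 0 (PySem.Str.len s - PySem.Str.len w + 1) 1 = [] := by
      rw [hlen_s, hlen_w]
      exact PySem.List.pyRange_one_eq_nil (by omega)
    rw [hrange]
    simp only [List.foldl_nil]
    have hnil : (List.range (n + 1)).filter (pvHit s.toList w.toList) = [] := by
      rw [List.filter_eq_nil_iff]
      intro j _
      simp only [pvHit, decide_eq_true_eq]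
      intro hpre
      have := hpre.length_le
      simp only [List.length_drop] at this
      omega
    unfold pvRowRes
    rw [hnil]
    simp
-- the A-side outer loop over row indices a..len
theorem pvOuterA (ws : List String) (w : String) :
    ∀ (a : Nat) (acc : List (List Int)), a ≤ ws.length →
      (PySem.List.pyRange (a : Int) (ws.length : Int) 1).foldl
        (fun acc i =>
          let row := PySem.List.pyGetD ws i ""
          getMasLocsGo row w i (PySem.Str.find row w) acc (row.toList.length + 2))
        acc
      = acc ++ (PySem.List.enumerate (ws.drop a) (a : Int)).flatMap
          (fun p => pvRowRes w p.1 p.2) := by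
    intro a
    induction ha : ws.length - a generalizing a with
    | zero =>
      intro acc hle
      have haeq : a = ws.length := by omega
      rw [haeq]
      rw [PySem.List.pyRange_one_eq_nil (by omega)]
      simp
    | succ t iht =>
      intro acc hle
      have halt : a < ws.length := by omega
      rw [PySem.List.pyRange_one_cons (by exact_mod_cast halt)]
      rw [List.foldl_cons]
      have hget : PySem.List.pyGetD ws (a : Int) "" = ws[a] := by
        rw [PySem.List.pyGetD_natCast]
        simp [halt]
      simp only [hget]
      have hcast : ((a : Int) + 1) = (((a + 1 : Nat)) : Int) := by omega
      rw [hcast, iht (a + 1) (by omega) _ (by omega)]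
      have hdrop : ws.drop a = ws[a] :: ws.drop (a + 1) := List.drop_eq_getElem_cons halt
      rw [hdrop, PySem.List.enumerate_cons]
      rw [List.flatMap_cons]
      rw [pvRowA w (a : Int) ws[a] acc]
      rw [List.append_assoc]
      simp only [← hcast]

-- ===== VERDICT (by name: the statement is the Claim_ definition above) =====
theorem getMasLocs_spec : Claim_equal_getMasLocs := by
  intro ws w _
  unfold Spec_getMasLocs getMasLocs getMasLocs_alt
  have hA := pvOuterA ws w 0 [] (by omega)
  simp only [Nat.cast_zero] at hA
  rw [hA]
  have hbody : (fun (acc : List (List Int)) (p : Int × String) =>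
      (PySem.List.pyRange 0 (PySem.Str.len p.2 - PySem.Str.len w + 1) 1).foldl
        (fun acc2 j =>
          if PySem.Str.slice p.2 (some j) (some (j + PySem.Str.len w)) = w then acc2 ++ [[p.1, j + 1]]
          else acc2) acc)
      = (fun (acc : List (List Int)) (p : Int × String) => acc ++ pvRowRes w p.1 p.2) :=
    funext fun acc => funext fun p => pvRowB w p.1 p.2 acc
  simp only []
  rw [hbody, PySem.List.foldl_append_eq_flatMap]
  simp
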